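-- pv_equiv track=rewrite | github.com/gpscal/voip_analysis_ml | ml_models/traffic_analyzer.py | _analyze_protocol_distribution
-- ===== SOURCE A (Python) =====
-- from collections import defaultdict
--
-- def _analyze_protocol_distribution(protocol_sequence):
--     """Analyze protocol distribution and transitions"""
--     counts = defaultdict(int)
--     transitions = defaultdict(int)
--
--     for i, proto in enumerate(protocol_sequence):
--         counts[proto] += 1
--         if i > 0:
--             transition = f"{protocol_sequence[i-1]}->{proto}"
--             transitions[transition] += 1
--
--     return {
--         'protocol_counts': dict(counts),
--         'protocol_transitions': dict(transitions)
--     }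
-- ===== SOURCE B (Python) =====
-- def _analyze_protocol_distribution(protocol_sequence):
--     """Analyze protocol distribution and transitions (dedup-then-count, no running counters)."""
--     pairs = [f"{a}->{b}" for a, b in zip(protocol_sequence, protocol_sequence[1:])]
--     counts = {p: protocol_sequence.count(p) for p in dict.fromkeys(protocol_sequence)}
--     transitions = {t: pairs.count(t) for t in dict.fromkeys(pairs)}
--     return {
--         'protocol_counts': counts,
--         'protocol_transitions': transitions,
--     }
-- ===== Notes on version B (the rewrite author's own statement) =====
-- stated objective: alternative
-- what changed: Replaces the fused incremental-counter loop by a dedup-then-count strategy: first the distinct protocols (and distinct adjacent-pair strings built by zip) are extracted in first-occurrence order via dict.fromkeys, then each distinct key's frequency is obtained by a separate .count scan of the sequence; no running counter dictionary is maintained at all.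
import Mathlib
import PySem

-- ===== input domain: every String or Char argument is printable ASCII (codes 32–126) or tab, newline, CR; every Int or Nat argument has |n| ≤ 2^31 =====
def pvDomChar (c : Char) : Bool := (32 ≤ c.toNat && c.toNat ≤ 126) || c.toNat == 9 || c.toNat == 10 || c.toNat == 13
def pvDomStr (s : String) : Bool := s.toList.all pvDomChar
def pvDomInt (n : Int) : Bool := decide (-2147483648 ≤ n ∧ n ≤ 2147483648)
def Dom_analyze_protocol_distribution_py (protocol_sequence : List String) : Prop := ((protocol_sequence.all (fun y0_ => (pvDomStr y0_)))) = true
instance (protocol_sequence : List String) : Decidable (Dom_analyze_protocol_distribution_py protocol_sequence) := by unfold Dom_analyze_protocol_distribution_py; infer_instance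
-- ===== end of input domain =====

-- B replaces A's fused running-counter loop by dedup-then-count: distinct keys first
-- (dict.fromkeys), then one .count scan per distinct key; same return value, proved exact.

-- ===== PORT A =====
-- fused loop: one pass with enumerate, transitions via protocol_sequence[i-1]
-- (the index i-1 is always in range when the branch is taken, so pyGetD's default is unreachable)
def analyze_protocol_distribution_py (protocol_sequence : List String) : List (String × List (String × Int)) :=
  let st :=
    (PySem.List.enumerate protocol_sequence 0).foldl
      (fun (st : PySem.Dict String Int × PySem.Dict String Int) ip =>
        let counts := st.1.modify ip.2 0 (· + 1)
        let transitions :=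
          if ip.1 > 0 then
            st.2.modify (PySem.List.pyGetD protocol_sequence (ip.1 - 1) "" ++ "->" ++ ip.2) 0 (· + 1)
          else st.2
        (counts, transitions))
      (PySem.Dict.empty, PySem.Dict.empty)
  [("protocol_counts", st.1.items), ("protocol_transitions", st.2.items)]

-- ===== PORT B =====
-- dedup-then-count: pairs by zip with the tail slice; dict.fromkeys = PySem.List.dedup;
-- each distinct key counted by a separate list.count scan
def analyze_protocol_distribution_py_alt (protocol_sequence : List String) : List (String × List (String × Int)) :=
  let pairs := (protocol_sequence.zip (PySem.List.slice protocol_sequence (some 1) none)).map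
      (fun ab => ab.1 ++ "->" ++ ab.2)
  let counts := (PySem.List.dedup protocol_sequence).map
      (fun p => (p, (PySem.List.count protocol_sequence p : Int)))
  let transitions := (PySem.List.dedup pairs).map
      (fun t => (t, (PySem.List.count pairs t : Int)))
  [("protocol_counts", counts), ("protocol_transitions", transitions)]

-- ===== PRECONDITION & SPEC =====
def Spec_analyze_protocol_distribution_py (protocol_sequence : List String) (out : List (String × List (String × Int))) : Prop := out = analyze_protocol_distribution_py_alt protocol_sequence
instance (protocol_sequence : List String) (out : List (String × List (String × Int))) : Decidable (Spec_analyze_protocol_distribution_py protocol_sequence out) := by unfold Spec_analyze_protocol_distribution_py; infer_instance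

-- ===== CLAIM (what is proved, stated in full; the proofs are below) =====
def Claim_equal_analyze_protocol_distribution_py : Prop := ∀ (protocol_sequence : List String), Dom_analyze_protocol_distribution_py protocol_sequence → Spec_analyze_protocol_distribution_py protocol_sequence (analyze_protocol_distribution_py protocol_sequence)

-- ===== LEMMAS AND PROOFS =====

-- zipping a snoc with its tail appends one pair (last of xs, x)
theorem pv_zip_tail_snoc {α : Type} (xs : List α) (x : α) (h : xs ≠ []) :
    (xs ++ [x]).zip ((xs ++ [x]).tail) = xs.zip xs.tail ++ [(xs.getLast h, x)] := by
  induction xs with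
  | nil => exact absurd rfl h
  | cons a t ih =>
    cases t with
    | nil => simp
    | cons b u =>
      have := ih (by simp)
      simp only [List.cons_append, List.tail_cons, List.zip_cons_cons] at this ⊢
      rw [this]
      simp [List.getLast]

-- the invariant of A's fused loop: counts = Counter(seq), transitions = Counter(pairs)
theorem pv_loopA_eq (ps : List String) :
    (PySem.List.enumerate ps 0).foldl
      (fun (st : PySem.Dict String Int × PySem.Dict String Int) ip =>
        let counts := st.1.modify ip.2 0 (· + 1)
        let transitions :=
          if ip.1 > 0 then
            st.2.modify (PySem.List.pyGetD ps (ip.1 - 1) "" ++ "->" ++ ip.2) 0 (· + 1)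
          else st.2
        (counts, transitions))
      (PySem.Dict.empty, PySem.Dict.empty)
    = (PySem.Dict.counter ps,
       PySem.Dict.counter ((ps.zip ps.tail).map (fun ab => ab.1 ++ "->" ++ ab.2))) := by
  induction ps using List.reverseRecOn with
  | nil => rfl
  | append_singleton xs x ih =>
    rw [PySem.List.enumerate_append, List.foldl_append]
    have hcong :
        (PySem.List.enumerate xs 0).foldl
          (fun (st : PySem.Dict String Int × PySem.Dict String Int) ip =>
            let counts := st.1.modify ip.2 0 (· + 1)
            let transitions :=
              if ip.1 > 0 then
                st.2.modify (PySem.List.pyGetD (xs ++ [x]) (ip.1 - 1) "" ++ "->" ++ ip.2) 0 (· + 1)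
              else st.2
            (counts, transitions))
          (PySem.Dict.empty, PySem.Dict.empty)
        = (PySem.List.enumerate xs 0).foldl
          (fun (st : PySem.Dict String Int × PySem.Dict String Int) ip =>
            let counts := st.1.modify ip.2 0 (· + 1)
            let transitions :=
              if ip.1 > 0 then
                st.2.modify (PySem.List.pyGetD xs (ip.1 - 1) "" ++ "->" ++ ip.2) 0 (· + 1)
              else st.2
            (counts, transitions))
          (PySem.Dict.empty, PySem.Dict.empty) := by
      apply PySem.List.foldl_congr_mem
      intro acc p hp
      rcases (PySem.List.mem_enumerate_iff _ _ _).1 hp with ⟨k, hk, rfl⟩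
      simp only [zero_add]
      by_cases hk0 : (k : Int) > 0
      · have hk1 : 1 ≤ k := by exact_mod_cast hk0
        have hcast : (k : Int) - 1 = ((k - 1 : Nat) : Int) := by omega
        have hlt : k - 1 < xs.length := by omega
        simp only [hk0, if_true, hcast, PySem.List.pyGetD_natCast]
        rw [List.getD_eq_getElem?_getD, List.getD_eq_getElem?_getD,
            List.getElem?_append_left hlt]
      · have hk0' : ¬ 0 < k := by exact_mod_cast hk0
        simp [hk0']
    rw [hcong, ih]
    simp only [PySem.List.enumerate_cons, PySem.List.enumerate_nil, zero_add, List.foldl_cons, List.foldl_nil]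
    rcases List.eq_nil_or_concat' xs with rfl | ⟨_, _, _⟩
    · rfl
    · have hne : xs ≠ [] := by rename_i h1 h2 h3; subst h3; simp
      have hpos : ((xs.length : Int)) > 0 := by
        have := List.length_pos_iff.2 hne; exact_mod_cast this
      have hcast : ((xs.length : Int)) - 1 = ((xs.length - 1 : Nat) : Int) := by
        have := List.length_pos_iff.2 hne; omega
      have hget : PySem.List.pyGetD (xs ++ [x]) ((xs.length : Int) - 1) "" = xs.getLast hne := by
        rw [hcast, PySem.List.pyGetD_natCast, List.getD_eq_getElem?_getD,
            List.getElem?_append_left (by have := List.length_pos_iff.2 hne; omega),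
            List.getElem?_eq_getElem (by have := List.length_pos_iff.2 hne; omega)]
        simp [List.getLast_eq_getElem]
      simp only [hpos, if_true, hget]
      rw [pv_zip_tail_snoc xs x hne]
      simp only [List.map_append, List.map_cons, List.map_nil]
      rw [← PySem.Dict.counter_append_singleton, ← PySem.Dict.counter_append_singleton]

-- ===== VERDICT (by name: the statement is the Claim_ definition above) =====
theorem analyze_protocol_distribution_py_spec : Claim_equal_analyze_protocol_distribution_py := by
  intro ps _
  show _ = _
  unfold analyze_protocol_distribution_py analyze_protocol_distribution_py_alt
  rw [pv_loopA_eq, PySem.List.slice_from_one]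
  simp only [PySem.Dict.items_counter, PySem.List.dedup_eq_ofList, PySem.List.count_eq]
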